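-- pv_equiv track=rewrite | github.com/REvDl/Algorithmic_practice | leetcode/2026/medium/minFlips.py | minFlips_1
-- ===== SOURCE A (Python) =====
-- def minFlips_1(s: str) -> int:
-- 	n = len(s)
-- 	s2 = s+s
-- 	ans = n
-- 	for start in range(n):
-- 		count0 = 0
-- 		count1 = 0
-- 		for i in range(n):
-- 			if s2[start + i] != ("0" if i % 2 == 0 else "1"):
-- 				count0 += 1
-- 			if s2[start + i] != ("1" if i % 2 == 0 else "0"):
-- 				count1 += 1
-- 		ans = min(count0, count1, ans)
-- 	return ans
-- ===== SOURCE B (Python) =====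
-- def minFlips_1(s: str) -> int:
--     # Sliding window over the doubled string with incremental mismatch counts: O(n) instead of A's O(n^2).
--     n = len(s)
--     m0 = 0  # mismatches of window vs the global pattern "0101..." (indexed by absolute position)
--     m1 = 0  # mismatches of window vs the global pattern "1010..."
--     for i in range(n):
--         if s[i] != "01"[i % 2]:
--             m0 += 1
--         if s[i] != "10"[i % 2]:
--             m1 += 1
--     ans = n
--     s2 = s + s
--     for start in range(n):
--         ans = min(min(ans, m0), m1)
--         out = s2[start]
--         if out != "01"[start % 2]:
--             m0 -= 1
--         if out != "10"[start % 2]: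
--             m1 -= 1
--         j = start + n
--         inc = s2[j]
--         if inc != "01"[j % 2]:
--             m0 += 1
--         if inc != "10"[j % 2]:
--             m1 += 1
--     return ans
-- ===== Notes on version B (the rewrite author's own statement) =====
-- stated objective: faster
-- what changed: Replaces the per-rotation rescan (recounting both mismatch patterns from scratch for every start) with a single sliding window over the doubled string that updates the two mismatch counts incrementally when the window slides by one.
import Mathlib
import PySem

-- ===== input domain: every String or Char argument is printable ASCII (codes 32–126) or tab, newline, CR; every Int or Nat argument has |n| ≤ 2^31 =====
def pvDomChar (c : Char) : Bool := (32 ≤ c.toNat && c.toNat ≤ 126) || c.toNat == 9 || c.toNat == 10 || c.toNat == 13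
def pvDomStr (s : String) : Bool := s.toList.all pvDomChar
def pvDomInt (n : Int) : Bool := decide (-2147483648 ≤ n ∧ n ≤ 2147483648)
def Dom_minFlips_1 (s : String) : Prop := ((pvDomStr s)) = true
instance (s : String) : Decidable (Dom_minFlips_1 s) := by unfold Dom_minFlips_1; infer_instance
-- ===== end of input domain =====

-- B replaces A's per-rotation rescan with a single sliding window over the doubled string,
-- updating the two mismatch counts incrementally: O(n) instead of O(n^2).

-- ===== PORT A =====
-- literal port of A: for every rotation start, recount both mismatch patterns from scratch
def minFlips_1 (s : String) : Int :=
  let n : Int := PySem.Str.len s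
  let s2 : List Char := s.toList ++ s.toList      -- s2 = s + s (chars; Python compares 1-char strings)
  (PySem.List.pyRange 0 n 1).foldl (fun ans start =>
    let c := (PySem.List.pyRange 0 n 1).foldl (fun (c : Int × Int) i =>
      let ch := PySem.List.pyGetD s2 (start + i) ' '   -- s2[start+i]; 0 ≤ start+i < 2n always, exact
      ((if ch ≠ (if PySem.Int.mod i 2 = 0 then '0' else '1') then c.1 + 1 else c.1),
       (if ch ≠ (if PySem.Int.mod i 2 = 0 then '1' else '0') then c.2 + 1 else c.2))) (0, 0)
    min (min c.1 c.2) ans) n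

-- ===== PORT B =====
-- literal port of Source B: initial mismatch counts for the window [0,n), then slide
def minFlips_1_alt (s : String) : Int :=
  let cs : List Char := s.toList
  let n : Int := PySem.Str.len s
  let m := (PySem.List.pyRange 0 n 1).foldl (fun (m : Int × Int) i =>
      let ch := PySem.List.pyGetD cs i ' '             -- s[i], always in range, exact
      ((if ch ≠ (if PySem.Int.mod i 2 = 0 then '0' else '1') then m.1 + 1 else m.1),
       (if ch ≠ (if PySem.Int.mod i 2 = 0 then '1' else '0') then m.2 + 1 else m.2))) (0, 0)
  let s2 : List Char := cs ++ cs
  let r := (PySem.List.pyRange 0 n 1).foldl (fun (st : Int × Int × Int) start =>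
      let ans := min (min st.1 st.2.1) st.2.2
      let out := PySem.List.pyGetD s2 start ' '
      let m0 := if out ≠ (if PySem.Int.mod start 2 = 0 then '0' else '1') then st.2.1 - 1 else st.2.1
      let m1 := if out ≠ (if PySem.Int.mod start 2 = 0 then '1' else '0') then st.2.2 - 1 else st.2.2
      let j := start + n
      let inc := PySem.List.pyGetD s2 j ' '
      let m0 := if inc ≠ (if PySem.Int.mod j 2 = 0 then '0' else '1') then m0 + 1 else m0
      let m1 := if inc ≠ (if PySem.Int.mod j 2 = 0 then '1' else '0') then m1 + 1 else m1
      (ans, m0, m1)) (n, m.1, m.2)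
  r.1

-- ===== PRECONDITION & SPEC =====
def Spec_minFlips_1 (s : String) (out : Int) : Prop := out = minFlips_1_alt s
instance (s : String) (out : Int) : Decidable (Spec_minFlips_1 s out) := by unfold Spec_minFlips_1; infer_instance

-- ===== CLAIM (what is proved, stated in full; the proofs are below) =====
def Claim_equal_minFlips_1 : Prop := ∀ (s : String), Dom_minFlips_1 s → Spec_minFlips_1 s (minFlips_1 s)

-- ===== LEMMAS AND PROOFS =====

-- mismatch indicator of position j of t against the global alternating pattern starting with '0' / '1'
def pvG (t : List Char) (j : Nat) : Int := if t.getD j ' ' ≠ (if j % 2 = 0 then '0' else '1') then 1 else 0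
def pvH (t : List Char) (j : Nat) : Int := if t.getD j ' ' ≠ (if j % 2 = 0 then '1' else '0') then 1 else 0

-- sum of f over the length-n window starting at a
def pvS (f : Nat → Int) (n a : Nat) : Int := ((List.range n).map (fun i => f (a + i))).sum

-- answer accumulator after processing starts 0..k-1
def pvM (u : Nat → Int) (init : Int) : Nat → Int
  | 0 => init
  | k + 1 => min (u k) (pvM u init k)

theorem pv_if_sub (c : Prop) [Decidable c] (x : Int) :
    (if c then x - 1 else x) = x - (if c then (1:Int) else 0) := by split_ifs <;> ring

theorem pv_if_add (c : Prop) [Decidable c] (x : Int) :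
    (if c then x + 1 else x) = x + (if c then (1:Int) else 0) := by split_ifs <;> ring

theorem pv_pairfold (P Q : Nat → Prop) [DecidablePred P] [DecidablePred Q]
    (l : List Nat) (a b : Int) :
    l.foldl (fun (c : Int × Int) k =>
      ((if P k then c.1 + 1 else c.1), (if Q k then c.2 + 1 else c.2))) (a, b)
      = (a + (l.map (fun k => if P k then (1:Int) else 0)).sum,
         b + (l.map (fun k => if Q k then (1:Int) else 0)).sum) := by
  induction l generalizing a b with
  | nil => simp
  | cons x xs ih =>
      simp only [List.foldl_cons, List.map_cons, List.sum_cons, ih]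
      refine Prod.ext ?_ ?_ <;> simp <;> split_ifs <;> ring

theorem pv_foldl_min (u : Nat → Int) (init : Int) (k : Nat) :
    (List.range k).foldl (fun ans a => min (u a) ans) init = pvM u init k := by
  induction k with
  | zero => simp [pvM]
  | succ k ih => rw [List.range_succ, List.foldl_append, ih]; rfl

theorem pvS_front (f : Nat → Int) (m a : Nat) : pvS f (m + 1) a = f a + pvS f m (a + 1) := by
  unfold pvS
  rw [List.range_succ_eq_map]
  simp only [List.map_cons, List.sum_cons, List.map_map, Function.comp_def, add_zero]
  congr 1
  apply congrArg
  apply List.map_congr_left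
  intro i _
  congr 1
  omega

theorem pvS_back (f : Nat → Int) (m a : Nat) : pvS f (m + 1) a = pvS f m a + f (a + m) := by
  unfold pvS
  rw [List.range_succ]
  simp

theorem pvS_slide (f : Nat → Int) (n a : Nat) (hn : n ≠ 0) :
    pvS f n (a + 1) = pvS f n a - f a + f (a + n) := by
  obtain ⟨m, rfl⟩ := Nat.exists_eq_succ_of_ne_zero hn
  rw [pvS_back f m (a + 1), pvS_front f m a]
  have h : a + 1 + m = a + (m + 1) := by omega
  rw [h]; ring

-- the window at an even start compares against the same global pattern, at an odd start against the opposite one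
theorem pv_min_shift (t : List Char) (n a : Nat) :
    min (((List.range n).map (fun i => if t.getD (a + i) ' ' ≠ (if i % 2 = 0 then '0' else '1') then (1:Int) else 0)).sum)
        (((List.range n).map (fun i => if t.getD (a + i) ' ' ≠ (if i % 2 = 0 then '1' else '0') then (1:Int) else 0)).sum)
      = min (pvS (pvG t) n a) (pvS (pvH t) n a) := by
  by_cases h : a % 2 = 0
  · have e0 : ∀ i : Nat, (if t.getD (a + i) ' ' ≠ (if i % 2 = 0 then '0' else '1') then (1:Int) else 0) = pvG t (a + i) := by
      intro i; unfold pvG; have hp : (a + i) % 2 = i % 2 := by omega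
      rw [hp]
    have e1 : ∀ i : Nat, (if t.getD (a + i) ' ' ≠ (if i % 2 = 0 then '1' else '0') then (1:Int) else 0) = pvH t (a + i) := by
      intro i; unfold pvH; have hp : (a + i) % 2 = i % 2 := by omega
      rw [hp]
    simp only [pvS, e0, e1]
  · have e0 : ∀ i : Nat, (if t.getD (a + i) ' ' ≠ (if i % 2 = 0 then '0' else '1') then (1:Int) else 0) = pvH t (a + i) := by
      intro i; unfold pvH
      have hp : (if (a + i) % 2 = 0 then '1' else '0') = (if i % 2 = 0 then '0' else '1') := by
        by_cases hi : i % 2 = 0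
        · rw [if_pos hi, if_neg (by omega)]
        · rw [if_neg hi, if_pos (by omega)]
      rw [hp]
    have e1 : ∀ i : Nat, (if t.getD (a + i) ' ' ≠ (if i % 2 = 0 then '1' else '0') then (1:Int) else 0) = pvG t (a + i) := by
      intro i; unfold pvG
      have hp : (if (a + i) % 2 = 0 then '0' else '1') = (if i % 2 = 0 then '1' else '0') := by
        by_cases hi : i % 2 = 0
        · rw [if_pos hi, if_neg (by omega)]
        · rw [if_neg hi, if_pos (by omega)]
      rw [hp]
    simp only [pvS, e0, e1]
    exact min_comm _ _

-- cast-cleanup: Int.mod of a cast index by 2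
theorem pv_mod2 (i : Nat) : PySem.Int.mod (i : Int) 2 = ((i % 2 : Nat) : Int) := by
  exact_mod_cast PySem.Int.mod_natCast i 2

-- A in closed form
theorem pvA_closed (s : String) :
    minFlips_1 s
      = pvM (fun a => min (pvS (pvG (s.toList ++ s.toList)) s.toList.length a)
                          (pvS (pvH (s.toList ++ s.toList)) s.toList.length a))
            (s.toList.length : Int) s.toList.length := by
  set cs := s.toList with hcs
  set t := cs ++ cs with ht
  set n := cs.length with hn
  unfold minFlips_1
  simp only [PySem.Str.len_eq, ← hcs, ← ht, ← hn]
  rw [PySem.List.pyRange_one]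
  simp only [sub_zero, Int.toNat_natCast, List.foldl_map, zero_add]
  refine (List.foldl_ext _ (fun ans a => min (min (pvS (pvG t) n a) (pvS (pvH t) n a)) ans) _ ?_).trans ?_
  · intro b a ha
    simp only [pv_mod2, Nat.cast_eq_zero, ← Nat.cast_add, PySem.List.pyGetD_natCast]
    rw [pv_pairfold (fun k => t.getD (a + k) ' ' ≠ (if k % 2 = 0 then '0' else '1'))
                    (fun k => t.getD (a + k) ' ' ≠ (if k % 2 = 0 then '1' else '0'))]
    simp only [zero_add]
    rw [pv_min_shift]
  · exact pv_foldl_min _ _ n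

-- B's initial counts equal the window sums at start 0 (indices below n read the first copy of cs)
theorem pv_init (cs : List Char) (p q : Char) :
    ((List.range cs.length).map (fun k => if cs.getD k ' ' ≠ (if k % 2 = 0 then p else q) then (1:Int) else 0)).sum
      = ((List.range cs.length).map (fun i => if (cs ++ cs).getD (0 + i) ' ' ≠ (if (0 + i) % 2 = 0 then p else q) then (1:Int) else 0)).sum := by
  apply congrArg
  apply List.map_congr_left
  intro i hi
  rw [List.mem_range] at hi
  rw [zero_add, List.getD_append _ _ _ _ hi]

-- B's sliding loop maintains (answer so far, window mismatch counts)
theorem pvB_inv (t : List Char) (n : Nat) (hn : n ≠ 0) (init : Int) (k : Nat) :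
    (List.range k).foldl
      (fun (st : Int × Int × Int) a =>
        (min (min st.1 st.2.1) st.2.2,
         (if t.getD (a + n) ' ' ≠ (if (a + n) % 2 = 0 then '0' else '1') then
            (if t.getD a ' ' ≠ (if a % 2 = 0 then '0' else '1') then st.2.1 - 1 else st.2.1) + 1
          else (if t.getD a ' ' ≠ (if a % 2 = 0 then '0' else '1') then st.2.1 - 1 else st.2.1)),
         (if t.getD (a + n) ' ' ≠ (if (a + n) % 2 = 0 then '1' else '0') then
            (if t.getD a ' ' ≠ (if a % 2 = 0 then '1' else '0') then st.2.2 - 1 else st.2.2) + 1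
          else (if t.getD a ' ' ≠ (if a % 2 = 0 then '1' else '0') then st.2.2 - 1 else st.2.2))))
      (init, pvS (pvG t) n 0, pvS (pvH t) n 0)
      = (pvM (fun a => min (pvS (pvG t) n a) (pvS (pvH t) n a)) init k,
         pvS (pvG t) n k, pvS (pvH t) n k) := by
  induction k with
  | zero => simp [pvM]
  | succ k ih =>
      rw [List.range_succ, List.foldl_append, ih]
      simp only [List.foldl_cons, List.foldl_nil]
      refine Prod.ext ?_ (Prod.ext ?_ ?_) <;> simp only [pv_if_sub, pv_if_add]
      · show min (min (pvM _ init k) _) _ = pvM _ init (k + 1)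
        show _ = min (min (pvS (pvG t) n k) (pvS (pvH t) n k)) (pvM _ init k)
        omega
      · show pvS (pvG t) n k - _ + _ = pvS (pvG t) n (k + 1)
        rw [pvS_slide _ _ _ hn]; rfl
      · show pvS (pvH t) n k - _ + _ = pvS (pvH t) n (k + 1)
        rw [pvS_slide _ _ _ hn]; rfl

-- B in closed form (nonempty string)
theorem pvB_closed (s : String) (hn : s.toList.length ≠ 0) :
    minFlips_1_alt s
      = pvM (fun a => min (pvS (pvG (s.toList ++ s.toList)) s.toList.length a)
                          (pvS (pvH (s.toList ++ s.toList)) s.toList.length a))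
            (s.toList.length : Int) s.toList.length := by
  set cs := s.toList with hcs
  set t := cs ++ cs with ht
  set n := cs.length with hnn
  unfold minFlips_1_alt
  simp only [PySem.Str.len_eq, ← hcs, ← ht, ← hnn]
  rw [PySem.List.pyRange_one]
  simp only [sub_zero, Int.toNat_natCast, List.foldl_map, zero_add,
    pv_mod2, Nat.cast_eq_zero, ← Nat.cast_add, PySem.List.pyGetD_natCast]
  rw [pv_pairfold (fun k => cs.getD k ' ' ≠ (if k % 2 = 0 then '0' else '1'))
                  (fun k => cs.getD k ' ' ≠ (if k % 2 = 0 then '1' else '0'))]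
  simp only [zero_add]
  rw [pv_init cs '0' '1', pv_init cs '1' '0']
  have h0 : ((List.range n).map (fun i => if t.getD (0 + i) ' ' ≠ (if (0 + i) % 2 = 0 then '0' else '1') then (1:Int) else 0)).sum = pvS (pvG t) n 0 := rfl
  have h1 : ((List.range n).map (fun i => if t.getD (0 + i) ' ' ≠ (if (0 + i) % 2 = 0 then '1' else '0') then (1:Int) else 0)).sum = pvS (pvH t) n 0 := rfl
  rw [h0, h1, pvB_inv t n hn ((n : Nat) : Int) n]

theorem pv_main (s : String) : minFlips_1 s = minFlips_1_alt s := by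
  by_cases hn : s.toList.length = 0
  · have hnil : s.toList = [] := List.length_eq_zero_iff.mp hn
    unfold minFlips_1 minFlips_1_alt
    simp [PySem.Str.len_eq, hnil]
  · rw [pvA_closed, pvB_closed s hn]

-- ===== VERDICT (by name: the statement is the Claim_ definition above) =====
theorem minFlips_1_spec : Claim_equal_minFlips_1 := by
  intro s _
  unfold Spec_minFlips_1
  exact pv_main s
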